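-- pv_equiv track=rewrite | github.com/jamwal69/sql | sqlinjector/modules/payload_manager.py | _apply_case_variation
-- ===== SOURCE A (Python) =====
-- def _apply_case_variation(payload: str, pattern: str) -> str:
--     """Apply case variation pattern to payload."""
--     # Extract case pattern from example
--     case_pattern = []
--     for char in pattern:
--         if char.isalpha():
--             case_pattern.append(char.isupper())
--
--     result = ""
--     pattern_index = 0
--
--     for char in payload:
--         if char.isalpha() and pattern_index < len(case_pattern):
--             result += char.upper() if case_pattern[pattern_index] else char.lower()
--             pattern_index += 1
--         else:
--             result += char
--
--     return result
-- ===== SOURCE B (Python) =====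
-- def _apply_case_variation(payload: str, pattern: str) -> str:
--     """Apply case variation pattern to payload."""
--     out = []
--     j = 0
--     for i, c in enumerate(payload):
--         if c.isalpha():
--             while j < len(pattern) and not pattern[j].isalpha():
--                 j += 1
--             if j >= len(pattern):
--                 out.append(payload[i:])
--                 return "".join(out)
--             out.append(c.upper() if pattern[j].isupper() else c.lower())
--             j += 1
--         else:
--             out.append(c)
--     return "".join(out)
-- ===== Notes on version B (the rewrite author's own statement) =====
-- stated objective: alternative
-- what changed: Replaces A's two-phase scheme (precompute a boolean case_pattern list, then apply it by index) with a two-pointer merge over payload and the raw pattern string: non-alpha pattern chars are skipped lazily at each alpha payload char, and when the pattern is exhausted the untouched payload suffix is appended and the function returns early.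
import Mathlib
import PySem

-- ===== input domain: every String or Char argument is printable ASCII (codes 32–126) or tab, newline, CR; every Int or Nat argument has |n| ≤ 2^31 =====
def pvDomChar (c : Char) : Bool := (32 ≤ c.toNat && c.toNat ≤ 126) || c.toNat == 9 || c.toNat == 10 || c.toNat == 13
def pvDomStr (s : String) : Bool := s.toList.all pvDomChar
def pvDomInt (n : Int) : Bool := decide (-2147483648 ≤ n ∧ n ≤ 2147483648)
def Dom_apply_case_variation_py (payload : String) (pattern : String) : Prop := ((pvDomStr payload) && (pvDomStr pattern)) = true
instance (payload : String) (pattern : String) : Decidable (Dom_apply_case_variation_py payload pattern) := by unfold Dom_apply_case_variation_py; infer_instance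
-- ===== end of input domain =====

-- B replaces A's two-phase scheme (precompute a boolean case_pattern, then apply it by index) with a
-- two-pointer merge over payload and the raw pattern, with lazy skipping and an early-exit suffix copy;
-- same output everywhere ("alternative", no speed claim).

-- ===== PORT A =====
-- literal port of A: build case_pattern by a guarded append-fold over pattern, then one fold over
-- payload carrying (result, pattern_index); the getD default is never read (guarded by the index check).
def apply_case_variation_py (payload : String) (pattern : String) : String :=
  let case_pattern : List Bool :=
    pattern.toList.foldl (fun acc c =>
      if PySem.Chars.isalpha c then acc ++ [PySem.Chars.isupper c] else acc) []
  let st := payload.toList.foldl (fun (st : List Char × Nat) c =>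
      if PySem.Chars.isalpha c && decide (st.2 < case_pattern.length) then
        (st.1 ++ [if case_pattern.getD st.2 false then PySem.Chars.upperChar c
                  else PySem.Chars.lowerChar c], st.2 + 1)
      else (st.1 ++ [c], st.2)) ([], 0)
  String.mk st.1

-- ===== PORT B =====
-- port of Source B's loop: the remaining pattern (from cursor j) is carried as a list; the inner
-- `while` skipping non-alpha pattern chars is List.dropWhile; `j >= len(pattern)` is the empty
-- remainder, and the early `return` appending payload[i:] is returning c :: cs directly.
def pvMerge : List Char → List Char → List Char
  | [], _ => []
  | c :: cs, pat =>
      if PySem.Chars.isalpha c then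
        match pat.dropWhile (fun d => !PySem.Chars.isalpha d) with
        | [] => c :: cs
        | d :: ds =>
            (if PySem.Chars.isupper d then PySem.Chars.upperChar c
             else PySem.Chars.lowerChar c) :: pvMerge cs ds
      else c :: pvMerge cs pat

def apply_case_variation_py_alt (payload : String) (pattern : String) : String :=
  String.mk (pvMerge payload.toList pattern.toList)

-- ===== PRECONDITION & SPEC =====
def Spec_apply_case_variation_py (payload : String) (pattern : String) (out : String) : Prop := out = apply_case_variation_py_alt payload pattern
instance (payload : String) (pattern : String) (out : String) : Decidable (Spec_apply_case_variation_py payload pattern out) := by unfold Spec_apply_case_variation_py; infer_instance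

-- ===== CLAIM (what is proved, stated in full; the proofs are below) =====
def Claim_equal_apply_case_variation_py : Prop := ∀ (payload : String) (pattern : String), Dom_apply_case_variation_py payload pattern → Spec_apply_case_variation_py payload pattern (apply_case_variation_py payload pattern)

-- ===== LEMMAS AND PROOFS =====

-- common reference: apply the flag list to the alphabetic chars in order, surplus chars unchanged
def pvApplyFlags : List Char → List Bool → List Char
  | [], _ => []
  | c :: cs, fs =>
      if PySem.Chars.isalpha c then
        match fs with
        | [] => c :: pvApplyFlags cs []
        | b :: bs => (if b then PySem.Chars.upperChar c else PySem.Chars.lowerChar c) :: pvApplyFlags cs bs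
      else c :: pvApplyFlags cs fs

lemma pvApplyFlags_nil (cs : List Char) : pvApplyFlags cs [] = cs := by
  induction cs with
  | nil => rfl
  | cons c cs ih => unfold pvApplyFlags; split <;> simp [ih]

-- A's payload loop, characterised against the remaining flags (drop i)
lemma pvA_loop (cp : List Bool) (cs : List Char) (acc : List Char) (i : Nat) :
    (cs.foldl (fun (st : List Char × Nat) c =>
      if PySem.Chars.isalpha c && decide (st.2 < cp.length) then
        (st.1 ++ [if cp.getD st.2 false then PySem.Chars.upperChar c
                  else PySem.Chars.lowerChar c], st.2 + 1)
      else (st.1 ++ [c], st.2)) (acc, i)).1 = acc ++ pvApplyFlags cs (cp.drop i) := by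
  induction cs generalizing acc i with
  | nil => simp [pvApplyFlags]
  | cons c cs ih =>
    rw [List.foldl_cons]
    by_cases ha : PySem.Chars.isalpha c
    · by_cases hi : i < cp.length
      · have hdrop := List.drop_eq_getElem_cons hi
        rw [if_pos (by simp [ha, hi])]
        rw [ih, hdrop]
        simp [pvApplyFlags, ha, List.getD_eq_getElem?_getD, List.getElem?_eq_getElem hi]
      · have hdrop : cp.drop i = [] := List.drop_eq_nil_iff.mpr (by omega)
        rw [if_neg (by simp [hi])]
        rw [ih, hdrop]
        simp [pvApplyFlags, ha]
    · rw [if_neg (by simp [ha])]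
      rw [ih]
      simp [pvApplyFlags, ha]

-- the alpha-filter of a list, expressed through dropWhile of its non-alpha prefix
lemma pvFilter_dropWhile (pat : List Char) :
    pat.filter PySem.Chars.isalpha =
      match pat.dropWhile (fun d => !PySem.Chars.isalpha d) with
      | [] => []
      | d :: ds => d :: ds.filter PySem.Chars.isalpha := by
  induction pat with
  | nil => rfl
  | cons d ds ih =>
    by_cases ha : PySem.Chars.isalpha d
    · simp [List.filter_cons, List.dropWhile_cons, ha]
    · simp [List.filter_cons, List.dropWhile_cons, ha, ih]

-- B's merge computes pvApplyFlags of the extracted flag list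
lemma pvMerge_eq (cs : List Char) (pat : List Char) :
    pvMerge cs pat = pvApplyFlags cs ((pat.filter PySem.Chars.isalpha).map PySem.Chars.isupper) := by
  induction cs generalizing pat with
  | nil => rfl
  | cons c cs ih =>
    by_cases ha : PySem.Chars.isalpha c
    · rw [pvFilter_dropWhile pat]
      cases hdw : pat.dropWhile (fun d => !PySem.Chars.isalpha d) with
      | nil =>
        simp only [pvMerge, ha, if_pos, hdw]
        simp [pvApplyFlags, ha, pvApplyFlags_nil]
      | cons d ds =>
        simp only [pvMerge, ha, if_pos, hdw, List.map_cons]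
        simp [pvApplyFlags, ha, ih]
    · simp [pvMerge, ha, pvApplyFlags, ih]

-- ===== VERDICT (by name: the statement is the Claim_ definition above) =====
theorem apply_case_variation_py_spec : Claim_equal_apply_case_variation_py := by
  intro payload pattern _
  unfold Spec_apply_case_variation_py apply_case_variation_py apply_case_variation_py_alt
  rw [PySem.List.foldl_append_if PySem.Chars.isalpha PySem.Chars.isupper pattern.toList []]
  simp only [List.nil_append]
  rw [pvMerge_eq]
  have h := pvA_loop ((pattern.toList.filter PySem.Chars.isalpha).map PySem.Chars.isupper)
      payload.toList [] 0
  simp only [List.nil_append, List.drop_zero] at h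
  exact congrArg String.mk h
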